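-- pv_equiv track=rewrite | github.com/ivanwakeup/algorithms | algorithms/prep/microsoft/min_deletions_to_obtain_string.py | min_deletions_partitioning_approach
-- ===== SOURCE A (Python) =====
-- from collections import Counter
--
-- def min_deletions_partitioning_approach(s):
--     counts_right = Counter(s)
--     counts_left = Counter()
--     result = float('inf')
--     for i in range(len(s)):
--         result = min(result, (counts_left["B"] + counts_right["A"]))
--         counts_right[s[i]]-=1
--         counts_left[s[i]]+=1
--     result = min(result, (counts_left["B"] + counts_right["A"]))
--     return result
-- ===== SOURCE B (Python) =====
-- def min_deletions_partitioning_approach(s):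
--     b_count = 0
--     ans = 0
--     for c in s:
--         if c == 'B':
--             b_count += 1
--         elif c == 'A':
--             ans = min(ans + 1, b_count)
--     return ans
-- ===== Notes on version B (the rewrite author's own statement) =====
-- stated objective: simpler
-- what changed: Replaced the prefix/suffix Counter enumeration over all split points with a single-pass DP keeping only a running count of B-characters and the minimum deletions so far (min-recurrence on each A-character), eliminating both Counters.
import Mathlib
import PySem

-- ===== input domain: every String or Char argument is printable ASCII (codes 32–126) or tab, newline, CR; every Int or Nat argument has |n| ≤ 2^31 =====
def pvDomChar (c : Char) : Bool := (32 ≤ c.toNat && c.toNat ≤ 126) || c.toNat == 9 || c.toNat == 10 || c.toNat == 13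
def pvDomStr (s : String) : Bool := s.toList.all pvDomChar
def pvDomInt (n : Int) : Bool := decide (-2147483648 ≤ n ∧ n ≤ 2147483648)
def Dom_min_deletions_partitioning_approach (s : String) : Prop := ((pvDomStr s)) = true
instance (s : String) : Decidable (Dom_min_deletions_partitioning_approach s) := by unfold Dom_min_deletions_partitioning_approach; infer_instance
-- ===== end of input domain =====

-- B replaces A's prefix/suffix Counter enumeration over all split points by a one-pass
-- DP keeping only a 'B'-count and the running minimum (simpler, no dictionaries).

-- ===== PORT A =====
-- min(result, v) where result starts as float('inf'): none plays inf, exactly Python's min here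
def pyMinInf (res : Option Int) (v : Int) : Int :=
  match res with
  | none => v
  | some r => min r v

-- one iteration of A's loop: take the min at the current split, then move s[i] right → left
def stepA (st : PySem.Dict Char Int × PySem.Dict Char Int × Option Int) (c : Char) :
    PySem.Dict Char Int × PySem.Dict Char Int × Option Int :=
  let res := some (pyMinInf st.2.2 (st.2.1.getD 'B' 0 + st.1.getD 'A' 0))
  (st.1.modify c 0 (· - 1), st.2.1.modify c 0 (· + 1), res)

def min_deletions_partitioning_approach (s : String) : Int :=
  let cs := s.toList
  -- counts_right = Counter(s); counts_left = Counter(); result = inf; loop over i touching s[i]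
  let st := cs.foldl stepA (PySem.Dict.counter cs, (PySem.Dict.empty : PySem.Dict Char Int), (none : Option Int))
  -- final result = min(result, counts_left["B"] + counts_right["A"])
  pyMinInf st.2.2 (st.2.1.getD 'B' 0 + st.1.getD 'A' 0)

-- ===== PORT B =====
def stepB (st : Int × Int) (c : Char) : Int × Int :=
  if c = 'B' then (st.1 + 1, st.2)
  else if c = 'A' then (st.1, min (st.2 + 1) st.1)
  else st

def min_deletions_partitioning_approach_alt (s : String) : Int :=
  (s.toList.foldl stepB (0, 0)).2

-- ===== PRECONDITION & SPEC =====
def Spec_min_deletions_partitioning_approach (s : String) (out : Int) : Prop := out = min_deletions_partitioning_approach_alt s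
instance (s : String) (out : Int) : Decidable (Spec_min_deletions_partitioning_approach s out) := by unfold Spec_min_deletions_partitioning_approach; infer_instance

-- ===== CLAIM (what is proved, stated in full; the proofs are below) =====
def Claim_equal_min_deletions_partitioning_approach : Prop := ∀ (s : String), Dom_min_deletions_partitioning_approach s → Spec_min_deletions_partitioning_approach s (min_deletions_partitioning_approach s)

-- ===== LEMMAS AND PROOFS =====

-- loop invariant: cl['B'] is B's b_count, cr['A'] counts the 'A's still to come, and the
-- min accumulated so far, once combined with the split at the current position, is B's ans
-- (shifted by the 'A's remaining on the right); ans ≤ b_count throughout.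
lemma loop_eq : ∀ (rest : List Char) (cr cl : PySem.Dict Char Int) (res : Option Int) (b ans : Int),
    cl.getD 'B' 0 = b →
    cr.getD 'A' 0 = (rest.count 'A' : Int) →
    pyMinInf res (b + (rest.count 'A' : Int)) = ans + (rest.count 'A' : Int) →
    ans ≤ b →
    (let st := rest.foldl stepA (cr, cl, res)
     pyMinInf st.2.2 (st.2.1.getD 'B' 0 + st.1.getD 'A' 0)) = (rest.foldl stepB (b, ans)).2 := by
  intro rest
  induction rest with
  | nil =>
    intro cr cl res b ans hB hA hres _
    simp only [List.count_nil, Nat.cast_zero, add_zero] at hA hres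
    simp [List.foldl, hB, hA, hres]
  | cons c rest ih =>
    intro cr cl res b ans hB hA hres hle
    simp only [List.foldl_cons]
    have hAc : ((c :: rest).count 'A' : Int)
        = (rest.count 'A' : Int) + (if c = 'A' then 1 else 0) := by
      by_cases h : c = 'A' <;> simp [List.count_cons, h]
    by_cases hcB : c = 'B'
    · subst hcB
      have h1 : (cl.modify 'B' 0 (· + 1)).getD 'B' 0 = b + 1 := by
        simp [PySem.Dict.getD_modify, hB]
      have h2 : (cr.modify 'B' 0 (· - 1)).getD 'A' 0 = (rest.count 'A' : Int) := by
        have : (('A' : Char) = 'B') = False := by simp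
        simp [PySem.Dict.getD_modify, this, hA]
      have h3 : pyMinInf (some (pyMinInf res (cl.getD 'B' 0 + cr.getD 'A' 0)))
          ((b + 1) + (rest.count 'A' : Int)) = ans + (rest.count 'A' : Int) := by
        rw [hB, hA, hres]
        have : (if ('B' : Char) = 'A' then (1:Int) else 0) = 0 := by simp
        rw [hAc, this] at hres ⊢
        simp only [pyMinInf]
        omega
      have := ih (cr.modify 'B' 0 (· - 1)) (cl.modify 'B' 0 (· + 1))
        (some (pyMinInf res (cl.getD 'B' 0 + cr.getD 'A' 0))) (b + 1) ans
        h1 h2 h3 (by omega)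
      simpa [stepA, stepB] using this
    · by_cases hcA : c = 'A'
      · subst hcA
        have h1 : (cl.modify 'A' 0 (· + 1)).getD 'B' 0 = b := by
          have : (('B' : Char) = 'A') = False := by simp
          simp [PySem.Dict.getD_modify, this, hB]
        have h2 : (cr.modify 'A' 0 (· - 1)).getD 'A' 0 = (rest.count 'A' : Int) := by
          simp [hA]
        have h3 : pyMinInf (some (pyMinInf res (cl.getD 'B' 0 + cr.getD 'A' 0)))
            (b + (rest.count 'A' : Int)) = min (ans + 1) b + (rest.count 'A' : Int) := by
          rw [hB, hA, hres]
          have : (if ('A' : Char) = 'A' then (1:Int) else 0) = 1 := by simp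
          rw [hAc, this] at hres ⊢
          simp only [pyMinInf]
          omega
        have := ih (cr.modify 'A' 0 (· - 1)) (cl.modify 'A' 0 (· + 1))
          (some (pyMinInf res (cl.getD 'B' 0 + cr.getD 'A' 0))) b (min (ans + 1) b)
          h1 h2 h3 (by omega)
        simpa [stepA, stepB] using this
      · have h1 : (cl.modify c 0 (· + 1)).getD 'B' 0 = b := by
          have : (('B' : Char) = c) = False := by simp [Ne.symm hcB]
          simp [PySem.Dict.getD_modify, this, hB]
        have h2 : (cr.modify c 0 (· - 1)).getD 'A' 0 = (rest.count 'A' : Int) := by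
          have hne : (('A' : Char) = c) = False := by simp [Ne.symm hcA]
          have : (if c = 'A' then (1:Int) else 0) = 0 := by simp [hcA]
          rw [hAc, this, add_zero] at hA
          simp [PySem.Dict.getD_modify, hne, hA]
        have h3 : pyMinInf (some (pyMinInf res (cl.getD 'B' 0 + cr.getD 'A' 0)))
            (b + (rest.count 'A' : Int)) = ans + (rest.count 'A' : Int) := by
          rw [hB, hA, hres]
          have : (if c = 'A' then (1:Int) else 0) = 0 := by simp [hcA]
          rw [hAc, this] at hres ⊢
          simp only [pyMinInf]
          omega
        have := ih (cr.modify c 0 (· - 1)) (cl.modify c 0 (· + 1))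
          (some (pyMinInf res (cl.getD 'B' 0 + cr.getD 'A' 0))) b ans h1 h2 h3 hle
        simpa [stepA, stepB, hcA, hcB] using this

-- ===== VERDICT (by name: the statement is the Claim_ definition above) =====
theorem min_deletions_partitioning_approach_spec : Claim_equal_min_deletions_partitioning_approach := by
  intro s _
  unfold Spec_min_deletions_partitioning_approach min_deletions_partitioning_approach min_deletions_partitioning_approach_alt
  exact loop_eq s.toList (PySem.Dict.counter s.toList) PySem.Dict.empty none 0 0
    (by simp [PySem.Dict.getD_empty]) (by simp [PySem.Dict.getD_counter])
    (by simp [pyMinInf]) le_rfl
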